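-- pv_equiv track=rewrite | github.com/taeuk0210/Algorithm | 프로그래머스/1/133502. 햄버거 만들기/햄버거 만들기.py | solution
-- ===== SOURCE A (Python) =====
-- def solution(ingredient):
--     answer = 0
--     stack = []
--     for i in ingredient:
--         if len(stack) >= 3 and i==1 and stack[-1]==3 and stack[-2]==2 and stack[-3]==1:
--             stack.pop()
--             stack.pop()
--             stack.pop()
--             answer += 1
--         else:
--             stack.append(i)
--     return answer
-- ===== SOURCE B (Python) =====
-- def solution(ingredient):
--     xs = list(ingredient)
--     answer = 0
--     while True:
--         for i in range(len(xs) - 3):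
--             if xs[i:i+4] == [1, 2, 3, 1]:
--                 del xs[i:i+4]
--                 answer += 1
--                 break
--         else:
--             return answer
-- ===== Notes on version B (the rewrite author's own statement) =====
-- stated objective: alternative
-- what changed: Replaces the single-pass stack with a fixpoint rewrite loop: repeatedly find the first contiguous [1,2,3,1] window in a copy of the list, splice it out and count, until no window remains; the argument is never mutated.
import Mathlib
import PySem

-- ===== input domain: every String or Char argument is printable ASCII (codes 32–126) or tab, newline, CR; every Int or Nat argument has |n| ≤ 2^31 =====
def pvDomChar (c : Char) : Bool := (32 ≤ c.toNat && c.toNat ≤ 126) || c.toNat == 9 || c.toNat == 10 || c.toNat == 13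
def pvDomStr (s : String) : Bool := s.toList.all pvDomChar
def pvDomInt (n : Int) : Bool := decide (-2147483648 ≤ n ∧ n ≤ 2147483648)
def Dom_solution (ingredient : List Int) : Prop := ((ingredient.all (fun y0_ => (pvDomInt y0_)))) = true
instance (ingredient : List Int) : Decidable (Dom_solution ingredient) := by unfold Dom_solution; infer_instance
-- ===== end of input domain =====

-- B is an alternative (not faster) fixpoint-rewrite implementation: repeatedly splice out the
-- first contiguous [1,2,3,1] window and count, instead of A's single-pass stack.

-- ===== PORT A =====
-- Python's stack is kept reversed (head = stack[-1]); append = cons, the three pops = dropping 3.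
def solutionStep (acc : Int × List Int) (i : Int) : Int × List Int :=
  match acc with
  | (answer, c :: b :: a :: rest) =>
    if i = 1 ∧ c = 3 ∧ b = 2 ∧ a = 1 then (answer + 1, rest)
    else (answer, i :: c :: b :: a :: rest)
  | (answer, stack) => (answer, i :: stack)

def solution (ingredient : List Int) : Int :=
  (ingredient.foldl solutionStep (0, [])).1

-- ===== PORT B =====
-- the inner `for` scan of Source B: first index whose 4-window equals [1,2,3,1],
-- returned as the split (prefix before the window, suffix after it); none if no window.
def findPat : List Int → Option (List Int × List Int)
  | a :: b :: c :: d :: rest =>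
    if a = 1 ∧ b = 2 ∧ c = 3 ∧ d = 1 then some ([], rest)
    else (findPat (b :: c :: d :: rest)).map (fun p => (a :: p.1, p.2))
  | _ => none

-- needed by solution_alt's termination
lemma findPat_decomp : ∀ (xs u v : List Int), findPat xs = some (u, v) →
    xs = u ++ 1 :: 2 :: 3 :: 1 :: v := by
  intro xs
  induction xs with
  | nil => intro u v h; simp [findPat] at h
  | cons a tl ih =>
    intro u v h
    match tl with
    | [] => simp [findPat] at h
    | [b] => simp [findPat] at h
    | [b, c] => simp [findPat] at h
    | b :: c :: d :: rest =>
      rw [findPat] at h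
      split at h
      · rename_i hc
        obtain ⟨h1, h2, h3, h4⟩ := hc
        simp at h
        obtain ⟨hu, hv⟩ := h
        subst hu hv h1 h2 h3 h4
        rfl
      · rcases ho : findPat (b :: c :: d :: rest) with _ | ⟨u', v'⟩ <;> rw [ho] at h
        · simp at h
        · simp at h
          obtain ⟨hu, hv⟩ := h
          have := ih u' v' ho
          subst hu hv
          simp [this]

def solution_alt (ingredient : List Int) : Int :=
  match h : findPat ingredient with
  | some (u, v) => 1 + solution_alt (u ++ v)
  | none => 0
termination_by ingredient.length
decreasing_by
  have := findPat_decomp ingredient u v h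
  subst this
  simp
  omega

-- ===== PRECONDITION & SPEC =====
def Spec_solution (ingredient : List Int) (out : Int) : Prop := out = solution_alt ingredient
instance (ingredient : List Int) (out : Int) : Decidable (Spec_solution ingredient out) := by unfold Spec_solution; infer_instance

-- ===== CLAIM (what is proved, stated in full; the proofs are below) =====
def Claim_equal_solution : Prop := ∀ (ingredient : List Int), Dom_solution ingredient → Spec_solution ingredient (solution ingredient)

-- ===== LEMMAS AND PROOFS =====

-- the step never fires unless the incoming element is 1 and the stack top is 3,2,1
lemma step_push (ans : Int) (s : List Int) (i : Int)
    (hns : ¬ (i = 1 ∧ ∃ r, s = 3 :: 2 :: 1 :: r)) :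
    solutionStep (ans, s) i = (ans, i :: s) := by
  match s with
  | [] => rfl
  | [c] => rfl
  | [c, b] => rfl
  | c :: b :: a :: r =>
    rw [solutionStep]
    split
    · rename_i hc
      obtain ⟨h1, h2, h3, h4⟩ := hc
      exact absurd ⟨h1, r, by rw [h2, h3, h4]⟩ hns
    · rfl

lemma step_fire (ans : Int) (r : List Int) :
    solutionStep (ans, 3 :: 2 :: 1 :: r) 1 = (ans + 1, r) := by
  simp [solutionStep]

-- the answer component accumulates additively
lemma step_add (a : Int) (s : List Int) (i : Int) :
    solutionStep (a, s) i = ((solutionStep (0, s) i).1 + a, (solutionStep (0, s) i).2) := by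
  match s with
  | [] => simp [solutionStep]
  | [c] => simp [solutionStep]
  | [c, b] => simp [solutionStep]
  | c :: b :: a' :: r =>
    rw [solutionStep, solutionStep]
    split
    · simp; ring
    · simp

lemma foldl_add : ∀ (xs : List Int) (a : Int) (s : List Int),
    List.foldl solutionStep (a, s) xs
      = ((List.foldl solutionStep (0, s) xs).1 + a, (List.foldl solutionStep (0, s) xs).2) := by
  intro xs
  induction xs with
  | nil => simp
  | cons i xs ih =>
    intro a s
    simp only [List.foldl_cons]
    rw [step_add a s i, ih, ih (solutionStep (0, s) i).1]
    simp
    ring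

-- a word containing the pattern is found by findPat
lemma findPat_append_ne : ∀ (p q : List Int), findPat (p ++ 1 :: 2 :: 3 :: 1 :: q) ≠ none := by
  intro p
  induction p with
  | nil => intro q; simp [findPat]
  | cons a p' ih =>
    intro q
    match hp : p' ++ 1 :: 2 :: 3 :: 1 :: q with
    | [] => simp at hp
    | [b] => cases p' <;> simp_all
    | [b, c] => cases p' <;> [skip; (rename_i t; cases t)] <;> simp_all
    | b :: c :: d :: rest =>
      rw [List.cons_append, hp, findPat]
      split
      · simp
      · rcases ho : findPat (b :: c :: d :: rest) with _ | p2
        · exact absurd (hp ▸ ho) (ih q)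
        · simp

-- findPat returns the FIRST occurrence: any decomposition has a prefix at least as long
lemma findPat_min : ∀ (xs u v : List Int), findPat xs = some (u, v) →
    ∀ (u₂ v₂ : List Int), xs = u₂ ++ 1 :: 2 :: 3 :: 1 :: v₂ → u.length ≤ u₂.length := by
  intro xs
  induction xs with
  | nil => intro u v h; simp [findPat] at h
  | cons a tl ih =>
    intro u v h u₂ v₂ hx
    match tl with
    | [] => simp [findPat] at h
    | [b] => simp [findPat] at h
    | [b, c] => simp [findPat] at h
    | b :: c :: d :: rest =>
      rw [findPat] at h
      split at h
      · simp at h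
        obtain ⟨hu, _⟩ := h
        subst hu
        simp
      · rename_i hnc
        rcases ho : findPat (b :: c :: d :: rest) with _ | ⟨u', v'⟩ <;> rw [ho] at h
        · simp at h
        · simp at h
          obtain ⟨hu, _⟩ := h
          subst hu
          match u₂ with
          | [] =>
            simp at hx
            obtain ⟨h1, h2, h3, h4, _⟩ := hx
            exact absurd ⟨h1, h2, h3, h4⟩ hnc
          | e :: u₂' =>
            simp at hx
            obtain ⟨_, hx'⟩ := hx
            have := ih u' v' ho u₂' v₂ hx'
            simp
            omega

-- running A's loop over a pattern-free word only pushes (stack stays the reversed word)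
lemma run_nowin : ∀ (xs : List Int) (a : Int) (s : List Int),
    findPat (s.reverse ++ xs) = none →
    List.foldl solutionStep (a, s) xs = (a, xs.reverse ++ s) := by
  intro xs
  induction xs with
  | nil => intro a s _; simp
  | cons i xs ih =>
    intro a s hno
    simp only [List.foldl_cons]
    have hpush : solutionStep (a, s) i = (a, i :: s) := by
      apply step_push
      rintro ⟨hi, r, hs⟩
      subst hi hs
      exact findPat_append_ne r.reverse xs (by simpa using hno)
    rw [hpush]
    have h2 : findPat ((i :: s).reverse ++ xs) = none := by
      have : (i :: s).reverse ++ xs = s.reverse ++ i :: xs := by simp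
      rw [this]; exact hno
    rw [ih a (i :: s) h2]
    simp

-- the first occurrence's prefix is itself pattern-free
lemma findPat_prefix_none (xs u v : List Int) (h : findPat xs = some (u, v)) :
    findPat u = none := by
  rcases ho : findPat u with _ | ⟨u₀, v₀⟩
  · rfl
  · exfalso
    have hu := findPat_decomp u u₀ v₀ ho
    have hx := findPat_decomp xs u v h
    have hx2 : xs = u₀ ++ 1 :: 2 :: 3 :: 1 :: (v₀ ++ 1 :: 2 :: 3 :: 1 :: v) := by
      rw [hx, hu]; simp
    have := findPat_min xs u v h u₀ (v₀ ++ 1 :: 2 :: 3 :: 1 :: v) hx2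
    have : u.length = u₀.length + 4 + v₀.length := by rw [hu]; simp; omega
    omega

-- the first occurrence's prefix does not end with 1,2,3 (else the window would start earlier)
lemma findPat_prefix_notail (xs u v : List Int) (h : findPat xs = some (u, v)) :
    ¬ ∃ r, u.reverse = 3 :: 2 :: 1 :: r := by
  rintro ⟨r, hr⟩
  have hu : u = r.reverse ++ [1, 2, 3] := by
    have := congrArg List.reverse hr
    simpa using this
  have hx := findPat_decomp xs u v h
  have hx2 : xs = r.reverse ++ 1 :: 2 :: 3 :: 1 :: (2 :: 3 :: 1 :: v) := by
    rw [hx, hu]; simp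
  have := findPat_min xs u v h r.reverse (2 :: 3 :: 1 :: v) hx2
  have : u.length = r.length + 3 := by rw [hu]; simp
  simp at *; omega

lemma key (n : ℕ) : ∀ xs : List Int, xs.length = n → solution xs = solution_alt xs := by
  induction n using Nat.strong_induction_on with
  | _ n ih =>
    intro xs hlen
    rcases h : findPat xs with _ | ⟨u, v⟩
    · -- no window: both sides are 0
      have hrun := run_nowin xs 0 [] (by simpa using h)
      rw [solution_alt, h]
      unfold solution
      rw [show ((0 : Int), ([] : List Int)) = ((0 : Int), (List.reverse [] : List Int)) by simp] at hrun ⊢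
      simp at hrun
      simp [hrun]
    · have hx := findPat_decomp xs u v h
      have hpre := findPat_prefix_none xs u v h
      have hnt := findPat_prefix_notail xs u v h
      -- run A over xs = u ++ [1,2,3,1] ++ v
      have hu_run : List.foldl solutionStep (0, []) u = (0, u.reverse) := by
        have := run_nowin u 0 [] (by simpa using hpre)
        simpa using this
      have hp1 : solutionStep (0, u.reverse) 1 = (0, 1 :: u.reverse) := by
        apply step_push
        rintro ⟨_, r, hs⟩
        exact hnt ⟨r, hs⟩
      have hp2 : solutionStep (0, 1 :: u.reverse) 2 = (0, 2 :: 1 :: u.reverse) := by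
        apply step_push; rintro ⟨hc, _⟩; exact absurd hc (by norm_num)
      have hp3 : solutionStep (0, 2 :: 1 :: u.reverse) 3 = (0, 3 :: 2 :: 1 :: u.reverse) := by
        apply step_push; rintro ⟨hc, _⟩; exact absurd hc (by norm_num)
      have hfire := step_fire 0 u.reverse
      have hA : solution xs = solution (u ++ v) + 1 := by
        unfold solution
        rw [hx, List.foldl_append, hu_run]
        simp only [List.foldl_cons, hp1, hp2, hp3, hfire]
        rw [foldl_add v (0 + 1) u.reverse]
        rw [List.foldl_append, hu_run]
        simp
      have hlt : (u ++ v).length < n := by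
        rw [hx] at hlen
        simp at hlen
        simp
        omega
      have hih := ih (u ++ v).length hlt (u ++ v) rfl
      rw [solution_alt, h, hA, hih]
      ring

-- ===== VERDICT (by name: the statement is the Claim_ definition above) =====
theorem solution_spec : Claim_equal_solution := by
  intro xs _
  unfold Spec_solution
  exact key xs.length xs rfl
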